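-- pv_equiv track=rewrite | github.com/megies/i95_sds | i95_sds.py | _merge_stream_labels
-- ===== SOURCE A (Python) =====
-- def _merge_stream_labels(channels):
--     channels = list(channels)
--     if len(channels) == 1:
--         return channels[0]
--     first = channels[0]
--     if all(cha[1:] == first[1:] for cha in channels[1:]):
--         return '[{}]{}'.format(
--             ''.join(sorted([cha[0] for cha in channels])), first[1:])
--     elif all(cha[0] == first[0] for cha in channels[1:]) and \
--             all(cha[2:] == first[2:] for cha in channels[1:]):
--         return '{}[{}]{}'.format(
--             first[0], ''.join(sorted([cha[1] for cha in channels])), first[2:])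
--     else:
--         return '/'.join(channels)
-- ===== SOURCE B (Python) =====
-- def _merge_stream_labels(channels):
--     channels = list(channels)
--     if len(channels) == 1:
--         return channels[0]
--     first = channels[0]
--     # one pass over the other channels: where does each differ from `first`?
--     ok1 = True   # every channel differs from `first` at most at index 0
--     ok2 = True   # every channel differs from `first` at most at index 1
--     for cha in channels[1:]:
--         if len(cha) != len(first):
--             ok1 = ok2 = False
--             break
--         diffs = {i for i in range(len(first)) if cha[i] != first[i]}
--         if not diffs <= {0}:
--             ok1 = False
--         if not diffs <= {1}:
--             ok2 = False
--     if ok1: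
--         return '[{}]{}'.format(''.join(sorted(cha[0] for cha in channels)), first[1:])
--     if ok2:
--         return '{}[{}]{}'.format(first[0], ''.join(sorted(cha[1] for cha in channels)), first[2:])
--     return '/'.join(channels)
-- ===== Notes on version B (the rewrite author's own statement) =====
-- stated objective: alternative
-- what changed: Instead of re-slicing every channel twice with all(cha[1:]==first[1:]) and all(cha[0]==first[0])/all(cha[2:]==first[2:]), B makes one pass over the channels computing for each the set of positions where it differs from the first (length mismatch disqualifies both cases) and then decides case1/case2/join from subset-of-{0} / subset-of-{1} flags.
import Mathlib
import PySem

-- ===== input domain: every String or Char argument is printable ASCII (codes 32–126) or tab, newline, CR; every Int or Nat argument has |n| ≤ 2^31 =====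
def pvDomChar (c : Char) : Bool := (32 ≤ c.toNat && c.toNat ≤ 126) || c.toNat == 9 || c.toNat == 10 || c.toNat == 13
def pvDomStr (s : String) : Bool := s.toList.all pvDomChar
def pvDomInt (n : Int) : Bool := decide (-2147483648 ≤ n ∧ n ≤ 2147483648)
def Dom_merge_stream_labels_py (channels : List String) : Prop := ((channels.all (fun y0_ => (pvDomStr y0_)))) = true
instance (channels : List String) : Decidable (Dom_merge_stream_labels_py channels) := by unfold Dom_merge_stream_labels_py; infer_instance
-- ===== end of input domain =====

-- B replaces A's repeated slice comparisons by one pass computing, per channel, the set of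
-- positions where it differs from the first channel, then decides the three output forms from
-- subset-of-{0} / subset-of-{1} flags (objective: alternative decomposition, same cost).

-- ===== PORT A =====
def merge_stream_labels_py (channels : List String) : String :=
  if channels.length = 1 then PySem.List.pyGetD channels 0 "" else
  let first := (PySem.List.pyGetD channels 0 "").toList
  if channels.tail.all (fun cha =>
      PySem.List.slice cha.toList (some 1) none == PySem.List.slice first (some 1) none) then
    String.ofList (['['] ++
      PySem.List.sorted (channels.map (fun cha => PySem.List.pyGetD cha.toList 0 ' ')) (fun c => c) false
      ++ [']'] ++ PySem.List.slice first (some 1) none)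
  else if channels.tail.all (fun cha =>
           PySem.List.pyGetD cha.toList 0 ' ' == PySem.List.pyGetD first 0 ' ')
       && channels.tail.all (fun cha =>
           PySem.List.slice cha.toList (some 2) none == PySem.List.slice first (some 2) none) then
    String.ofList ([PySem.List.pyGetD first 0 ' ', '['] ++
      PySem.List.sorted (channels.map (fun cha => PySem.List.pyGetD cha.toList 1 ' ')) (fun c => c) false
      ++ [']'] ++ PySem.List.slice first (some 2) none)
  else PySem.Str.join "/" channels

-- ===== PORT B =====
-- loop of Source B: per channel the set of indices where it differs from `first`
-- (a length mismatch disqualifies both cases and breaks); indices stay in range,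
-- so plain List.range / getD are exact here.
def pvScanB (first : List Char) : List String → Bool × Bool
  | [] => (true, true)
  | cha :: rest =>
    if cha.toList.length ≠ first.length then (false, false)
    else
      let diffs := (List.range first.length).filter
        (fun i => !(cha.toList.getD i ' ' == first.getD i ' '))
      let r := pvScanB first rest
      (diffs.all (fun i => i == 0) && r.1, diffs.all (fun i => i == 1) && r.2)

def merge_stream_labels_py_alt (channels : List String) : String :=
  if channels.length = 1 then PySem.List.pyGetD channels 0 "" else
  let first := (PySem.List.pyGetD channels 0 "").toList
  let r := pvScanB first channels.tail
  if r.1 then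
    String.ofList (['['] ++
      PySem.List.sorted (channels.map (fun cha => PySem.List.pyGetD cha.toList 0 ' ')) (fun c => c) false
      ++ [']'] ++ PySem.List.slice first (some 1) none)
  else if r.2 then
    String.ofList ([PySem.List.pyGetD first 0 ' ', '['] ++
      PySem.List.sorted (channels.map (fun cha => PySem.List.pyGetD cha.toList 1 ' ')) (fun c => c) false
      ++ [']'] ++ PySem.List.slice first (some 2) none)
  else PySem.Str.join "/" channels

-- ===== PRECONDITION & SPEC =====
-- Pre_ admits exactly the inputs on which A returns: it excludes the empty list and the inputs
-- where A raises IndexError — empty-string channels reached by an indexing expression (cha[0] in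
-- a branch body or in the second branch's short-circuiting condition) and, when the second-bracket
-- branch is taken, channels shorter than 2 (its body indexes cha[1]).  The last disjunct admits the
-- inputs with empty strings on which A still returns the '/'-join because the second condition's
-- all(...) short-circuits at a non-empty mismatching channel before reaching any empty one.
def Pre_merge_stream_labels_py (channels : List String) : Prop :=
  channels ≠ [] ∧
  (channels.length = 1 ∨
    ((∀ c ∈ channels, c.toList ≠ []) ∧
     ((¬ ∀ c ∈ channels.tail,
         c.toList.drop 1 = (PySem.List.pyGetD channels 0 "").toList.drop 1) →
      (∀ c ∈ channels.tail,
         c.toList.getD 0 ' ' = (PySem.List.pyGetD channels 0 "").toList.getD 0 ' ') →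
      (∀ c ∈ channels.tail,
         c.toList.drop 2 = (PySem.List.pyGetD channels 0 "").toList.drop 2) →
      ∀ c ∈ channels, 2 ≤ c.toList.length)) ∨
    ((PySem.List.pyGetD channels 0 "").toList ≠ [] ∧
     (¬ ∀ c ∈ channels.tail,
        c.toList.drop 1 = (PySem.List.pyGetD channels 0 "").toList.drop 1) ∧
     ∃ i < channels.tail.length,
       (∀ j < i, (channels.tail.getD j "").toList ≠ [] ∧
          (channels.tail.getD j "").toList.getD 0 ' ' =
            (PySem.List.pyGetD channels 0 "").toList.getD 0 ' ') ∧
       (channels.tail.getD i "").toList ≠ [] ∧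
       (channels.tail.getD i "").toList.getD 0 ' ' ≠
         (PySem.List.pyGetD channels 0 "").toList.getD 0 ' '))
instance (channels : List String) : Decidable (Pre_merge_stream_labels_py channels) := by
  unfold Pre_merge_stream_labels_py; infer_instance

def pvWitness_merge_stream_labels_py : List String := ["ABC", "DBC"]

def Spec_merge_stream_labels_py (channels : List String) (out : String) : Prop := out = merge_stream_labels_py_alt channels
instance (channels : List String) (out : String) : Decidable (Spec_merge_stream_labels_py channels out) := by unfold Spec_merge_stream_labels_py; infer_instance

-- ===== CLAIM (what is proved, stated in full; the proofs are below) =====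
def Claim_equal_merge_stream_labels_py : Prop := ∀ (channels : List String), Dom_merge_stream_labels_py channels → Pre_merge_stream_labels_py channels → Spec_merge_stream_labels_py channels (merge_stream_labels_py channels)

-- ===== LEMMAS AND PROOFS =====

-- characterize equality of drops pointwise
theorem pvDrop_eq_iff (c f : List Char) (k : Nat) (h : c.length = f.length) :
    c.drop k = f.drop k ↔ ∀ i, k ≤ i → i < f.length → c.getD i ' ' = f.getD i ' ' := by
  have hc : (List.drop k c).length = c.length - k := by simp
  have hf : (List.drop k f).length = f.length - k := by simp
  constructor
  · intro hd i hk hi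
    have h1 : i - k < (c.drop k).length := by omega
    have := List.getElem_of_eq hd h1
    rw [List.getElem_drop, List.getElem_drop] at this
    rw [List.getD_eq_getElem c ' ' (by omega), List.getD_eq_getElem f ' ' (by omega)]
    simpa [Nat.add_sub_cancel' hk] using this
  · intro hp
    apply List.ext_getElem
    · omega
    · intro n h1 h2
      rw [List.getElem_drop, List.getElem_drop]
      have := hp (k + n) (by omega) (by omega)
      rwa [List.getD_eq_getElem c ' ' (by omega), List.getD_eq_getElem f ' ' (by omega)] at this

theorem pvDiffs_all_zero (c f : List Char) (h : c.length = f.length) :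
    ((List.range f.length).filter (fun i => !(c.getD i ' ' == f.getD i ' '))).all
        (fun i => i == 0) = true ↔ c.drop 1 = f.drop 1 := by
  rw [pvDrop_eq_iff c f 1 h]
  simp only [List.all_eq_true, List.mem_filter, List.mem_range, beq_iff_eq, Bool.not_eq_true',
    beq_eq_false_iff_ne, ne_eq]
  constructor
  · intro hp i h1 h2
    by_contra hne
    have := hp i ⟨h2, hne⟩
    omega
  · intro hp i ⟨h1, h2⟩
    by_contra hne
    exact h2 (hp i (by omega) h1)

theorem pvDiffs_all_one (c f : List Char) (h : c.length = f.length) :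
    ((List.range f.length).filter (fun i => !(c.getD i ' ' == f.getD i ' '))).all
        (fun i => i == 1) = true ↔ c.getD 0 ' ' = f.getD 0 ' ' ∧ c.drop 2 = f.drop 2 := by
  rw [pvDrop_eq_iff c f 2 h]
  simp only [List.all_eq_true, List.mem_filter, List.mem_range, beq_iff_eq, Bool.not_eq_true',
    beq_eq_false_iff_ne, ne_eq]
  constructor
  · intro hp
    constructor
    · by_cases h0 : 0 < f.length
      · by_contra hne
        have := hp 0 ⟨h0, hne⟩
        omega
      · have hf0 : f.length = 0 := by omega
        have hc0 : c.length = 0 := by omega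
        simp [List.eq_nil_of_length_eq_zero hf0, List.eq_nil_of_length_eq_zero hc0]
    · intro i h1 h2
      by_contra hne
      have := hp i ⟨h2, hne⟩
      omega
  · intro ⟨h0, hp⟩ i ⟨h1, h2⟩
    by_contra hne
    rcases Nat.lt_or_ge i 2 with hi | hi
    · interval_cases i
      · exact h2 h0
      · omega
    · exact h2 (hp i hi h1)

theorem pvScanB_fst_mp (f : List Char) (l : List String) (h : (pvScanB f l).1 = true) :
    ∀ s ∈ l, s.toList.drop 1 = f.drop 1 := by
  induction l with
  | nil => intro s hs; simp at hs
  | cons cha rest ih =>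
    by_cases hl : cha.toList.length = f.length
    · simp only [pvScanB, hl, ne_eq, not_true_eq_false, if_false, Bool.and_eq_true] at h
      intro s hs
      rcases List.mem_cons.mp hs with rfl | hs
      · exact (pvDiffs_all_zero _ _ hl).mp h.1
      · exact ih h.2 s hs
    · rw [show pvScanB f (cha::rest) = (false, false) from by
        simp only [pvScanB]; rw [if_pos hl]] at h
      simp at h

theorem pvScanB_fst_mpr (f : List Char) (l : List String) (hf : f ≠ [])
    (hl : ∀ s ∈ l, s.toList ≠ []) (h : ∀ s ∈ l, s.toList.drop 1 = f.drop 1) :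
    (pvScanB f l).1 = true := by
  induction l with
  | nil => rfl
  | cons cha rest ih =>
    have hd := h cha (List.mem_cons_self ..)
    have hlen : cha.toList.length = f.length := by
      have h1 : (cha.toList.drop 1).length = (f.drop 1).length := by rw [hd]
      have h2 : cha.toList ≠ [] := hl cha (List.mem_cons_self ..)
      simp only [List.length_drop] at h1
      have := List.length_pos_iff.mpr h2
      have := List.length_pos_iff.mpr hf
      omega
    simp only [pvScanB, hlen, ne_eq, not_true_eq_false, if_false, Bool.and_eq_true]
    exact ⟨(pvDiffs_all_zero _ _ hlen).mpr hd,
      ih (fun s hs => hl s (List.mem_cons_of_mem _ hs)) (fun s hs => h s (List.mem_cons_of_mem _ hs))⟩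

theorem pvScanB_snd_mp (f : List Char) (l : List String) (h : (pvScanB f l).2 = true) :
    ∀ s ∈ l, s.toList.getD 0 ' ' = f.getD 0 ' ' ∧ s.toList.drop 2 = f.drop 2 := by
  induction l with
  | nil => intro s hs; simp at hs
  | cons cha rest ih =>
    by_cases hl : cha.toList.length = f.length
    · simp only [pvScanB, hl, ne_eq, not_true_eq_false, if_false, Bool.and_eq_true] at h
      intro s hs
      rcases List.mem_cons.mp hs with rfl | hs
      · exact (pvDiffs_all_one _ _ hl).mp h.1
      · exact ih h.2 s hs
    · rw [show pvScanB f (cha::rest) = (false, false) from by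
        simp only [pvScanB]; rw [if_pos hl]] at h
      simp at h

theorem pvScanB_snd_mpr (f : List Char) (l : List String) (hf : 2 ≤ f.length)
    (hl : ∀ s ∈ l, 2 ≤ s.toList.length)
    (h : ∀ s ∈ l, s.toList.getD 0 ' ' = f.getD 0 ' ' ∧ s.toList.drop 2 = f.drop 2) :
    (pvScanB f l).2 = true := by
  induction l with
  | nil => rfl
  | cons cha rest ih =>
    have hd := h cha (List.mem_cons_self ..)
    have hlen : cha.toList.length = f.length := by
      have h1 : (cha.toList.drop 2).length = (f.drop 2).length := by rw [hd.2]
      have h2 := hl cha (List.mem_cons_self ..)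
      simp only [List.length_drop] at h1
      omega
    simp only [pvScanB, hlen, ne_eq, not_true_eq_false, if_false, Bool.and_eq_true]
    exact ⟨(pvDiffs_all_one _ _ hlen).mpr hd,
      ih (fun s hs => hl s (List.mem_cons_of_mem _ hs)) (fun s hs => h s (List.mem_cons_of_mem _ hs))⟩

-- ===== VERDICT (by name: the statement is the Claim_ definition above) =====
theorem merge_stream_labels_py_spec : Claim_equal_merge_stream_labels_py := by
  intro channels hdom hpre
  unfold Spec_merge_stream_labels_py
  obtain ⟨hne, hrest⟩ := hpre
  cases channels with
  | nil => exact absurd rfl hne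
  | cons ch0 rest =>
  by_cases h1 : (ch0 :: rest).length = 1
  · unfold merge_stream_labels_py merge_stream_labels_py_alt
    rw [if_pos h1, if_pos h1]
  · rcases hrest with hl1 | ⟨hnil, himp⟩ | ⟨hfne, hnc1, i, hi, hppre, hine, himis⟩
    · exact absurd hl1 h1
    · unfold merge_stream_labels_py merge_stream_labels_py_alt
      rw [if_neg h1, if_neg h1]
      simp only [PySem.List.slice_from_one,
        PySem.List.pyGetD_zero, List.getD_cons_zero, ← List.drop_one, List.drop_succ_cons,
        List.drop_zero] at himp ⊢
      simp only [PySem.List.slice_from _ (by norm_num : (0:Int) ≤ 2), show Int.toNat 2 = 2 from rfl] at *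
      have hfne : ch0.toList ≠ [] := hnil ch0 (List.mem_cons_self ..)
      have hrne : ∀ s ∈ rest, s.toList ≠ [] := fun s hs => hnil s (List.mem_cons_of_mem _ hs)
      by_cases hb1 : (rest.all fun cha => List.drop 1 cha.toList == List.drop 1 ch0.toList) = true
      · have hall : ∀ s ∈ rest, s.toList.drop 1 = ch0.toList.drop 1 := by
          simpa [List.all_eq_true] using hb1
        have hs1 : (pvScanB ch0.toList rest).1 = true := pvScanB_fst_mpr _ _ hfne hrne hall
        rw [if_pos hb1, if_pos hs1]
      · have hs1 : ¬ (pvScanB ch0.toList rest).1 = true := by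
          intro htrue
          exact hb1 (by simpa [List.all_eq_true] using pvScanB_fst_mp _ _ htrue)
        rw [if_neg hb1, if_neg hs1]
        by_cases hb2 : (((rest.all fun cha => cha.toList.getD 0 ' ' == ch0.toList.getD 0 ' ')) &&
            (rest.all fun cha => List.drop 2 cha.toList == List.drop 2 ch0.toList)) = true
        · have hb2' := hb2
          rw [Bool.and_eq_true] at hb2'
          obtain ⟨h2a, h2b⟩ := hb2'
          have h2a' : ∀ s ∈ rest, s.toList.getD 0 ' ' = ch0.toList.getD 0 ' ' := by
            simpa [List.all_eq_true] using h2a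
          have h2b' : ∀ s ∈ rest, s.toList.drop 2 = ch0.toList.drop 2 := by
            simpa [List.all_eq_true] using h2b
          have hlen : ∀ c ∈ ch0 :: rest, 2 ≤ c.toList.length := by
            apply himp _ h2a' h2b'
            intro hforall
            exact hb1 (by simp only [List.all_eq_true, beq_iff_eq]; exact hforall)
          have hs2 : (pvScanB ch0.toList rest).2 = true := by
            apply pvScanB_snd_mpr _ _ (hlen ch0 (List.mem_cons_self ..))
              (fun s hs => hlen s (List.mem_cons_of_mem _ hs))
            exact fun s hs => ⟨h2a' s hs, h2b' s hs⟩
          rw [if_pos hb2, if_pos hs2]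
        · have hs2 : ¬ (pvScanB ch0.toList rest).2 = true := by
            intro htrue
            have := pvScanB_snd_mp _ _ htrue
            apply hb2
            rw [Bool.and_eq_true]
            constructor
            · simp only [List.all_eq_true, beq_iff_eq]; exact fun s hs => (this s hs).1
            · simp only [List.all_eq_true, beq_iff_eq]; exact fun s hs => (this s hs).2
          rw [if_neg hb2, if_neg hs2]
    · -- A's second condition short-circuits at a non-empty mismatching channel: both sides join
      unfold merge_stream_labels_py merge_stream_labels_py_alt
      rw [if_neg h1, if_neg h1]
      simp only [PySem.List.slice_from_one, PySem.List.pyGetD_zero,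
        List.getD_cons_zero, ← List.drop_one, List.drop_succ_cons,
        List.drop_zero] at hnc1 himis ⊢
      simp only [List.tail_cons] at hi
      simp only [PySem.List.slice_from _ (by norm_num : (0:Int) ≤ 2),
        show Int.toNat 2 = 2 from rfl] at *
      -- hppre and hine are the part of Pre_ that keeps Python A from raising here
      have hmem : rest.getD i "" ∈ rest := by
        rw [List.getD_eq_getElem _ _ hi]; exact List.getElem_mem hi
      have hc1 : ¬ (rest.all fun cha => List.drop 1 cha.toList == List.drop 1 ch0.toList) = true := by
        intro h; exact hnc1 (by simpa [List.all_eq_true] using h)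
      have hs1 : ¬ (pvScanB ch0.toList rest).1 = true := fun h => hnc1 (pvScanB_fst_mp _ _ h)
      have hc2 : ¬ (((rest.all fun cha => cha.toList.getD 0 ' ' == ch0.toList.getD 0 ' ')) &&
          (rest.all fun cha => List.drop 2 cha.toList == List.drop 2 ch0.toList)) = true := by
        intro h
        rw [Bool.and_eq_true] at h
        have := h.1
        simp only [List.all_eq_true, beq_iff_eq] at this
        exact himis (this _ hmem)
      have hs2 : ¬ (pvScanB ch0.toList rest).2 = true := fun h =>
        himis ((pvScanB_snd_mp _ _ h _ hmem).1)
      rw [if_neg hc1, if_neg hs1, if_neg hc2, if_neg hs2]
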